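-- pv_equiv track=rewrite | github.com/Kulesza-Milewski/prg-basics | Test_MockTest2/p10.py | f
-- ===== SOURCE A (Python) =====
-- def f(array):
--     min_val = float('inf')
--     min_row = -1
--     min_col = -1
--
--     rows = len(array)
--     cols = len(array[0])
--
--     for r in range(rows):
--         for c in range(cols):
--             if array[r][c] < min_val:
--                 min_val = array[r][c]
--                 min_row = r
--                 min_col = c
--
--     return min_row == min_col
-- ===== SOURCE B (Python) =====
-- def f(array):
--     rows = len(array)
--     cols = len(array[0])
--     vals = [array[r][c] for r in range(rows) for c in range(cols)]
--     if not vals: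
--         return True
--     idx = vals.index(min(vals))
--     return idx // cols == idx % cols
-- ===== Notes on version B (the rewrite author's own statement) =====
-- stated objective: alternative
-- what changed: Replaces A's single nested scan that tracks (min_val,min_row,min_col) with a flatten-then-search decomposition: build the row-major value list, take min(), locate its first index with list.index, and recover the coordinates arithmetically via divmod by cols.
import Mathlib
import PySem

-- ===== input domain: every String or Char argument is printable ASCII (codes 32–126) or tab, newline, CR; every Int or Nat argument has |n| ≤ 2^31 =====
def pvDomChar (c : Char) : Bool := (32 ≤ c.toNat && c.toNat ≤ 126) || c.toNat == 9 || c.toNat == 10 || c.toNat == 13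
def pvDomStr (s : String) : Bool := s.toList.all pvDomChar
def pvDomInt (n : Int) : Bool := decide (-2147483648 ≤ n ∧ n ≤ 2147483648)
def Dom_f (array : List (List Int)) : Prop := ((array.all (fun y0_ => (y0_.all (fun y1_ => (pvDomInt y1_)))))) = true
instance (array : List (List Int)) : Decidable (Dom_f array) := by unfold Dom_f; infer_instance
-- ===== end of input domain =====

-- B replaces A's single nested scan tracking (min_val,min_row,min_col) by flatten-then-search:
-- build the row-major value list, take min(), find its first index, recover coordinates by divmod.

-- ===== PORT A =====
def f (array : List (List Int)) : Bool :=
  let rows : Int := array.length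
  let cols : Int := ((PySem.List.pyGet? array 0).getD []).length
  let st :=
    (PySem.List.pyRange 0 rows 1).foldl
      (fun (s : Option Int × Int × Int) r =>
        (PySem.List.pyRange 0 cols 1).foldl
          (fun (s : Option Int × Int × Int) c =>
            match s.1 with
            | none => (some (PySem.List.pyGetD (PySem.List.pyGetD array r []) c 0), r, c)
            | some m =>
              if PySem.List.pyGetD (PySem.List.pyGetD array r []) c 0 < m then
                (some (PySem.List.pyGetD (PySem.List.pyGetD array r []) c 0), r, c)
              else s)
          s)
      ((none : Option Int), (-1 : Int), (-1 : Int))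
  st.2.1 == st.2.2

-- ===== PORT B =====
def f_alt (array : List (List Int)) : Bool :=
  let rows : Int := array.length
  let cols : Int := ((PySem.List.pyGet? array 0).getD []).length
  let vals :=
    (PySem.List.pyRange 0 rows 1).flatMap
      (fun r => (PySem.List.pyRange 0 cols 1).map
        (fun c => PySem.List.pyGetD (PySem.List.pyGetD array r []) c 0))
  if vals.isEmpty then true
  else
    match PySem.List.min? vals (fun x => x) with
    | none => true   -- unreachable: vals ≠ []
    | some m =>
      match PySem.List.index? vals m with
      | none => true -- unreachable: m ∈ vals
      | some idx => PySem.Int.floordiv (idx : Int) cols == PySem.Int.mod (idx : Int) cols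

-- ===== PRECONDITION & SPEC =====
-- Pre_ excludes exactly the inputs on which Python A raises IndexError: the empty array
-- (len(array[0])) and jagged arrays where some row is shorter than len(array[0]).
def Pre_f (array : List (List Int)) : Prop :=
  array ≠ [] ∧ ∀ row ∈ array, (array.headD []).length ≤ row.length
instance (array : List (List Int)) : Decidable (Pre_f array) := by unfold Pre_f; infer_instance
def pvWitness_f : List (List Int) := [[1, 2], [3, 0]]

def Spec_f (array : List (List Int)) (out : Bool) : Prop := out = f_alt array
instance (array : List (List Int)) (out : Bool) : Decidable (Spec_f array out) := by unfold Spec_f; infer_instance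

-- ===== CLAIM (what is proved, stated in full; the proofs are below) =====
def Claim_equal_f : Prop := ∀ (array : List (List Int)), Dom_f array → Pre_f array → Spec_f array (f array)

-- ===== LEMMAS AND PROOFS =====

-- Flat scanner: state (current min, flat index of its first occurrence), counter p.
def pvStep (s : Option Int × Int) (p v : Int) : Option Int × Int :=
  match s.1 with
  | none => (some v, p)
  | some m => if v < m then (some v, p) else s

def pvScan : Option Int × Int → Int → List Int → Option Int × Int
  | s, _, [] => s
  | s, p, v :: t => pvScan (pvStep s p v) (p + 1) t

-- Mapping a flat state to A's (min, row, col) state, dividing the flat index by cols.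
def pvPsi (C : Int) : Option Int × Int → Option Int × Int × Int
  | (none, _) => (none, -1, -1)
  | (some m, i) => (some m, PySem.Int.floordiv i C, PySem.Int.mod i C)

lemma pvScan_concat (l1 l2 : List Int) : ∀ (s : Option Int × Int) (p : Int),
    pvScan s p (l1 ++ l2) = pvScan (pvScan s p l1) (p + (l1.length : Int)) l2 := by
  induction l1 with
  | nil => intro s p; simp [pvScan]
  | cons v t ih =>
    intro s p
    simp only [List.cons_append, pvScan, ih, List.length_cons]
    have h : p + 1 + (t.length : Int) = p + ((t.length + 1 : Nat) : Int) := by push_cast; ring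
    rw [h]

lemma pvScan_last (l : List Int) (x : Int) (s : Option Int × Int) (p : Int) :
    pvScan s p (l ++ [x]) = pvStep (pvScan s p l) (p + (l.length : Int)) x := by
  rw [pvScan_concat]; simp [pvScan]

lemma pv_fdmd (C : Nat) (hC : 0 < C) (r c : Int) (h0 : 0 ≤ c) (h1 : c < (C : Int)) :
    PySem.Int.floordiv (r * (C : Int) + c) (C : Int) = r ∧
    PySem.Int.mod (r * (C : Int) + c) (C : Int) = c := by
  have hCpos : (0 : Int) < (C : Int) := by exact_mod_cast hC
  have hfd : PySem.Int.floordiv (r * (C : Int) + c) (C : Int) = r := by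
    rw [PySem.Int.floordiv_eq_iff_of_pos hCpos]
    constructor
    · linarith
    · nlinarith
  refine ⟨hfd, ?_⟩
  have h := PySem.Int.floordiv_mul_add_mod (r * (C : Int) + c) (C : Int)
  rw [hfd] at h
  linarith

lemma pv_SC (C : Nat) (hC : 0 < C) (r c v : Int) (h0 : 0 ≤ c) (h1 : c < (C : Int))
    (S : Option Int × Int) :
    (match (pvPsi (C : Int) S).1 with
     | none => (some v, r, c)
     | some m => if v < m then (some v, r, c) else pvPsi (C : Int) S)
    = pvPsi (C : Int) (pvStep S (r * (C : Int) + c) v) := by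
  obtain ⟨mo, i⟩ := S
  obtain ⟨hfd, hmd⟩ := pv_fdmd C hC r c h0 h1
  cases mo with
  | none => simp [pvPsi, pvStep, hfd, hmd]
  | some m =>
    by_cases hv : v < m
    · simp [pvPsi, pvStep, hv, hfd, hmd]
    · simp [pvPsi, pvStep, hv]

lemma pv_IL (g : Int → Int → Int) (C : Nat) (hC : 0 < C) (r : Int) :
    ∀ (t : Nat), t ≤ C → ∀ (s : Option Int × Int),
    (PySem.List.pyRange 0 (t : Int) 1).foldl
      (fun (s3 : Option Int × Int × Int) c =>
        match s3.1 with
        | none => (some (g r c), r, c)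
        | some m => if g r c < m then (some (g r c), r, c) else s3)
      (pvPsi (C : Int) s)
    = pvPsi (C : Int) (pvScan s (r * (C : Int)) ((PySem.List.pyRange 0 (t : Int) 1).map (g r))) := by
  intro t
  induction t with
  | zero =>
    intro _ s
    simp [PySem.List.pyRange_one_eq_nil (by norm_num : (0:Int) ≤ 0), pvScan]
  | succ t ih =>
    intro ht s
    have h0t : (0 : Int) ≤ (t : Int) := by positivity
    have hcast : ((t + 1 : Nat) : Int) = (t : Int) + 1 := by push_cast; ring
    rw [hcast, PySem.List.pyRange_one_succ_right h0t, List.foldl_append, List.map_append,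
        List.foldl_cons, List.foldl_nil, List.map_cons, List.map_nil,
        ih (by omega) s, pvScan_last]
    have hlen : (((PySem.List.pyRange 0 (t : Int) 1).map (g r)).length : Int) = (t : Int) := by
      rw [List.length_map, PySem.List.length_pyRange_one]
      simp
    rw [hlen]
    exact pv_SC C hC r (t : Int) (g r (t : Int)) h0t (by exact_mod_cast ht) _

lemma pv_LB (g : Int → Int → Int) (C : Nat) : ∀ (R : Nat),
    ((PySem.List.pyRange 0 (R : Int) 1).flatMap
      (fun r => (PySem.List.pyRange 0 (C : Int) 1).map (g r))).length = R * C := by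
  intro R
  induction R with
  | zero => simp [PySem.List.pyRange_one_eq_nil (by norm_num : (0:Int) ≤ 0)]
  | succ R ih =>
    have h0R : (0 : Int) ≤ (R : Int) := by positivity
    have hcast : ((R + 1 : Nat) : Int) = (R : Int) + 1 := by push_cast; ring
    rw [hcast, PySem.List.pyRange_one_succ_right h0R, List.flatMap_append, List.length_append, ih]
    simp [PySem.List.length_pyRange_one, Nat.succ_mul]

lemma pv_OL (g : Int → Int → Int) (C : Nat) (hC : 0 < C) (s : Option Int × Int) :
    ∀ (R : Nat),
    (PySem.List.pyRange 0 (R : Int) 1).foldl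
      (fun (s3 : Option Int × Int × Int) r =>
        (PySem.List.pyRange 0 (C : Int) 1).foldl
          (fun (s3 : Option Int × Int × Int) c =>
            match s3.1 with
            | none => (some (g r c), r, c)
            | some m => if g r c < m then (some (g r c), r, c) else s3)
          s3)
      (pvPsi (C : Int) s)
    = pvPsi (C : Int) (pvScan s 0 ((PySem.List.pyRange 0 (R : Int) 1).flatMap
        (fun r => (PySem.List.pyRange 0 (C : Int) 1).map (g r)))) := by
  intro R
  induction R with
  | zero =>
    simp [PySem.List.pyRange_one_eq_nil (by norm_num : (0:Int) ≤ 0), pvScan]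
  | succ R ih =>
    have h0R : (0 : Int) ≤ (R : Int) := by positivity
    have hcast : ((R + 1 : Nat) : Int) = (R : Int) + 1 := by push_cast; ring
    rw [hcast, PySem.List.pyRange_one_succ_right h0R, List.foldl_append,
        List.foldl_cons, List.foldl_nil, ih, pv_IL g C hC (R : Int) C (le_refl C),
        List.flatMap_append, pvScan_concat]
    have hlen : ((((PySem.List.pyRange 0 (R : Int) 1).flatMap
        (fun r => (PySem.List.pyRange 0 (C : Int) 1).map (g r))).length : Int))
        = (R : Int) * (C : Int) := by
      rw [pv_LB g C R]; push_cast; ring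
    rw [hlen]
    simp

lemma pv_R2 : ∀ (l : List Int), l ≠ [] → ∀ (p : Int), ∃ (m : Int) (i : Nat),
    PySem.List.min? l (fun x => x) = some m ∧ PySem.List.index? l m = some i ∧
    pvScan (none, -1) p l = (some m, p + (i : Int)) := by
  intro l
  induction l using List.reverseRecOn with
  | nil => intro h; exact absurd rfl h
  | append_singleton l x ih =>
    intro _ p
    rcases eq_or_ne l [] with hl | hl
    · subst hl
      refine ⟨x, 0, ?_, ?_, ?_⟩
      · simp [PySem.List.min?_id_cons]
      · exact PySem.List.index?_cons_self x []
      · simp [pvScan, pvStep]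
    · obtain ⟨m, i, hmin, hidx, hscan⟩ := ih hl p
      obtain ⟨h, t, rfl⟩ := List.exists_cons_of_ne_nil hl
      have hmfold : m = t.foldl min h := by
        have := hmin
        rw [PySem.List.min?_id_cons] at this
        exact (Option.some.inj this).symm
      have hminapp : PySem.List.min? ((h :: t) ++ [x]) (fun y => y)
          = some (min (t.foldl min h) x) := by
        rw [List.cons_append, PySem.List.min?_id_cons, List.foldl_append]
        simp
      rw [pvScan_last, hscan]
      by_cases hx : x < m
      · refine ⟨x, (h :: t).length, ?_, ?_, ?_⟩
        · rw [hminapp, min_eq_right (le_of_lt (hmfold ▸ hx))]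
        · have hxnot : x ∉ (h :: t) := by
            intro hmem
            exact absurd (PySem.List.min?_isMin hmin x hmem) (not_le.mpr hx)
          exact PySem.List.index?_append_singleton_self (h :: t) x hxnot
        · simp [pvStep, hx]
      · refine ⟨m, i, ?_, ?_, ?_⟩
        · rw [hminapp, min_eq_left (hmfold ▸ (not_lt.mp hx))]
          rw [hmfold]
        · rw [PySem.List.index?_append_of_mem [x] (PySem.List.min?_mem hmin), hidx]
        · simp [pvStep, hx]

-- The two port bodies agree for every value function g and loop bounds R (rows), C (cols).
lemma pv_main (g : Int → Int → Int) (R C : Nat) :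
    (let st :=
      (PySem.List.pyRange 0 (R : Int) 1).foldl
        (fun (s3 : Option Int × Int × Int) r =>
          (PySem.List.pyRange 0 (C : Int) 1).foldl
            (fun (s3 : Option Int × Int × Int) c =>
              match s3.1 with
              | none => (some (g r c), r, c)
              | some m => if g r c < m then (some (g r c), r, c) else s3)
            s3)
        ((none : Option Int), (-1 : Int), (-1 : Int))
     st.2.1 == st.2.2)
    = (let vals :=
        (PySem.List.pyRange 0 (R : Int) 1).flatMap
          (fun r => (PySem.List.pyRange 0 (C : Int) 1).map (fun c => g r c))
       if vals.isEmpty then true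
       else
         match PySem.List.min? vals (fun x => x) with
         | none => true
         | some m =>
           match PySem.List.index? vals m with
           | none => true
           | some idx =>
             PySem.Int.floordiv (idx : Int) (C : Int) == PySem.Int.mod (idx : Int) (C : Int)) := by
  simp only []
  rcases Nat.eq_zero_or_pos C with hC | hC
  · subst hC
    simp [PySem.List.pyRange_one_eq_nil (by norm_num : (0:Int) ≤ 0)]
  · rcases Nat.eq_zero_or_pos R with hR | hR
    · subst hR
      simp [PySem.List.pyRange_one_eq_nil (by norm_num : (0:Int) ≤ 0)]
    · set vals := (PySem.List.pyRange 0 (R : Int) 1).flatMap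
        (fun r => (PySem.List.pyRange 0 (C : Int) 1).map (fun c => g r c)) with hvals
      have hlen : vals.length = R * C := pv_LB g C R
      have hne : vals ≠ [] := by
        intro h
        rw [h] at hlen
        simp at hlen
        omega
      obtain ⟨m, i, hmin, hidx, hscan⟩ := pv_R2 vals hne 0
      have hA := pv_OL g C hC ((none : Option Int), (-1 : Int)) R
      have hpsi : pvPsi (C : Int) ((none : Option Int), (-1 : Int))
          = ((none : Option Int), (-1 : Int), (-1 : Int)) := rfl
      rw [hpsi] at hA
      rw [hA, hscan]
      have hEmp : vals.isEmpty = false := List.isEmpty_eq_false_iff.mpr hne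
      rw [hEmp, hmin]
      rw [PySem.List.index?_eq_idxOf?] at hidx
      simp [pvPsi, hidx]

-- ===== VERDICT (by name: the statement is the Claim_ definition above) =====
theorem f_spec : Claim_equal_f := by
  intro array _ _
  show f array = f_alt array
  exact pv_main
    (fun r c => PySem.List.pyGetD (PySem.List.pyGetD array r []) c 0)
    array.length
    ((PySem.List.pyGet? array 0).getD []).length
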